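-- pv_equiv track=rewrite | github.com/JoshHumpherey/advent-of-code | 2019/4/main.py | has_doubles
-- ===== SOURCE A (Python) =====
-- def has_doubles(numstr: str) -> bool:
--     idx = 1
--     curr = numstr[0]
--     count = 1
--     while idx < len(numstr):
--         if numstr[idx] != curr:
--             if count == 2:
--                 return True
--             curr = numstr[idx]
--             count = 1
--         else:
--             count += 1
--         idx += 1
--     return count == 2
-- ===== SOURCE B (Python) =====
-- def has_doubles(numstr: str) -> bool:
--     # Stateless window test: a run of exactly two exists iff some position i
--     # starts an equal pair that is neither preceded nor followed by the same
--     # character.  No run counting, no loop state.  Returns False on ""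
--     # (where A raises IndexError on numstr[0]).
--     n = len(numstr)
--     return any(
--         numstr[i] == numstr[i + 1]
--         and (i == 0 or numstr[i - 1] != numstr[i])
--         and (i + 2 == n or numstr[i + 2] != numstr[i])
--         for i in range(n - 1)
--     )
-- ===== Notes on version B (the rewrite author's own statement) =====
-- stated objective: alternative
-- what changed: Replaces A's stateful run-length counter (curr/count with early return) by a stateless per-position window test: some index starts an equal pair that is neither preceded nor followed by the same character.
-- outside the precondition, e.g. on has_doubles(''): A raises IndexError, B returns False
import Mathlib
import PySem

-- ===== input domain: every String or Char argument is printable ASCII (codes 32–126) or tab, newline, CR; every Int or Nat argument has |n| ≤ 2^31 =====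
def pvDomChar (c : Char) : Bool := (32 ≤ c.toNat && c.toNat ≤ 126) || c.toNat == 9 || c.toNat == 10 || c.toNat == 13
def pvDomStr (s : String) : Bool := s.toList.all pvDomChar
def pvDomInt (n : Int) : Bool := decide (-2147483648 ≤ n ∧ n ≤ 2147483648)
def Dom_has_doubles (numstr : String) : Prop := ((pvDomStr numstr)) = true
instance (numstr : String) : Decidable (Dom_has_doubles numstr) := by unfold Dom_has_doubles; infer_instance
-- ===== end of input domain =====

-- B replaces A's stateful run-length counter with a stateless per-position window
-- test (an equal pair neither preceded nor followed by the same character); same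
-- O(n) cost. A raises IndexError on "", excluded by Pre_; B returns False there.


-- ===== PORT A =====
-- A's while loop: state (remaining characters, curr, count)
def hdLoop : List Char → Char → Int → Bool
  | [], _, count => count == 2
  | c :: rest, curr, count =>
    if c ≠ curr then
      if count == 2 then true else hdLoop rest c 1
    else
      hdLoop rest curr (count + 1)

def has_doubles (numstr : String) : Bool :=
  match numstr.toList with
  | [] => false          -- Python A raises IndexError here (numstr[0]); excluded by Pre_
  | c :: rest => hdLoop rest c 1   -- curr = numstr[0], count = 1, idx = 1

-- ===== PORT B =====
-- any(... for i in range(n-1)); all Python indexings numstr[i-1], numstr[i],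
-- numstr[i+1], numstr[i+2] are in range where their value matters, so getD is exact.
def has_doubles_alt (numstr : String) : Bool :=
  let l := numstr.toList
  let n := l.length
  (List.range (n - 1)).any (fun i =>
    (l.getD i ' ' == l.getD (i+1) ' ') &&
    ((i == 0) || (l.getD (i-1) ' ' != l.getD i ' ')) &&
    ((i + 2 == n) || (l.getD (i+2) ' ' != l.getD i ' ')))

-- ===== PRECONDITION & SPEC =====
-- Pre_ excludes exactly the empty string, on which A raises IndexError (numstr[0]).
def Pre_has_doubles (numstr : String) : Prop := numstr.toList ≠ []
instance (numstr : String) : Decidable (Pre_has_doubles numstr) := by unfold Pre_has_doubles; infer_instance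
def pvWitness_has_doubles : String := "1223"

def Spec_has_doubles (numstr : String) (out : Bool) : Prop := out = has_doubles_alt numstr
instance (numstr : String) (out : Bool) : Decidable (Spec_has_doubles numstr out) := by unfold Spec_has_doubles; infer_instance

-- ===== CLAIM (what is proved, stated in full; the proofs are below) =====
def Claim_equal_has_doubles : Prop := ∀ (numstr : String), Dom_has_doubles numstr → Pre_has_doubles numstr → Spec_has_doubles numstr (has_doubles numstr)

-- ===== LEMMAS AND PROOFS =====

-- Middle characterization: the string as a sequence of maximal runs; true iff
-- some run has length exactly 2.  Both ports are reduced to this.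
def runsR : List Char → Bool
  | [] => false
  | c :: rest =>
    ((rest.takeWhile (· == c)).length == 1) || runsR (rest.dropWhile (· == c))
termination_by l => l.length
decreasing_by
  simp only [List.length_cons]
  exact Nat.lt_succ_of_le (List.length_dropWhile_le _ _)

theorem runsR_nil : runsR [] = false := by rw [runsR]

theorem runsR_cons (c : Char) (rest : List Char) :
    runsR (c :: rest)
      = (((rest.takeWhile (· == c)).length == 1) || runsR (rest.dropWhile (· == c))) := by
  rw [runsR]

theorem hdLoop_cons (c : Char) (rest : List Char) (curr : Char) (count : Int) :
    hdLoop (c :: rest) curr count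
      = if c = curr then hdLoop rest curr (count + 1)
        else (if count == 2 then true else hdLoop rest c 1) := by
  by_cases h : c = curr
  · simp [hdLoop, h]
  · simp [hdLoop, h]

-- A's loop equals runsR, with the current run's consumed length in `count`.
theorem hdLoop_eq_runsR (rest : List Char) (curr : Char) (count : Int) :
    hdLoop rest curr count
      = ((count + ((rest.takeWhile (· == curr)).length : Int) == 2)
          || runsR (rest.dropWhile (· == curr))) := by
  induction rest generalizing curr count with
  | nil =>
    show (count == 2) = _
    simp [runsR_nil]
  | cons c rest ih =>
    rw [hdLoop_cons]
    by_cases hc : c = curr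
    · subst hc
      rw [if_pos rfl, ih]
      simp only [List.takeWhile_cons, List.dropWhile_cons, beq_self_eq_true, if_true,
        List.length_cons]
      congr 1
      rw [Bool.eq_iff_iff]
      simp only [beq_iff_eq]
      push_cast
      omega
    · have hcc : (c == curr) = false := by simp [hc]
      rw [if_neg hc]
      simp only [List.takeWhile_cons, List.dropWhile_cons, hcc, Bool.false_eq_true, if_false,
        List.length_nil, Nat.cast_zero, add_zero, if_neg]
      by_cases h2 : count = 2
      · simp [h2]
      · have h2' : (count == 2) = false := by simp [h2]
        rw [h2', if_neg (by simp [h2]), ih, runsR_cons]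
        simp only [Bool.false_or]
        congr 1
        rw [Bool.eq_iff_iff]
        simp only [beq_iff_eq]
        omega

-- B's window scan, generalized: `fresh` tells whether the (virtual) previous
-- character differs from the head (true at the start of the string).
def Qf (fresh : Bool) (l : List Char) : Bool :=
  (List.range (l.length - 1)).any (fun i =>
    (l.getD i ' ' == l.getD (i+1) ' ') &&
    ((if i = 0 then fresh else false) || (l.getD (i-1) ' ' != l.getD i ' ')) &&
    ((i + 2 == l.length) || (l.getD (i+2) ' ' != l.getD i ' ')))

theorem alt_eq_Qf (numstr : String) : has_doubles_alt numstr = Qf true numstr.toList := by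
  unfold has_doubles_alt Qf
  refine congrArg (List.any _) (funext fun i => ?_)
  rcases i with _ | j <;> simp

theorem Qf_cons (fresh : Bool) (a b : Char) (t : List Char) :
    Qf fresh (a :: b :: t)
      = (((a == b) && fresh && ((t.length == 0) || (t.getD 0 ' ' != a)))
          || Qf (a != b) (b :: t)) := by
  unfold Qf
  simp only [List.length_cons, Nat.add_sub_cancel, List.range_succ_eq_map, List.any_cons,
    List.any_map]
  refine congrArg₂ Bool.or ?_ (congrArg (List.any _) (funext fun i => ?_))
  · have hlen : ((0 + 2 : Nat) == t.length + 1 + 1) = (t.length == 0) := by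
      rw [Bool.eq_iff_iff]; simp only [beq_iff_eq]; omega
    simp only [List.getD_cons_zero, List.getD_cons_succ, hlen]
    cases fresh <;> simp [Bool.and_assoc, Bool.and_comm, Bool.and_left_comm]
  · rcases i with _ | j
    · have hlen : ((0 + 1 + 2 : Nat) == t.length + 1 + 1) = ((0 + 2 : Nat) == t.length + 1) := by
        rw [Bool.eq_iff_iff]; simp only [beq_iff_eq]; omega
      simp only [Function.comp, Nat.succ_eq_add_one, List.getD_cons_succ, List.getD_cons_zero, hlen]
      simp
    · have hlen : ((j + 1 + 1 + 2 : Nat) == t.length + 1 + 1) = ((j + 1 + 2 : Nat) == t.length + 1) := by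
        rw [Bool.eq_iff_iff]; simp only [beq_iff_eq]; omega
      simp only [Function.comp, Nat.succ_eq_add_one, List.getD_cons_succ, hlen]
      simp only [Nat.add_sub_cancel, List.getD_cons_succ]
      simp

-- strip the leading maximal run
def stripRun : List Char → List Char
  | [] => []
  | c :: t => t.dropWhile (· == c)

theorem Qf_eq_runsR (l : List Char) (fresh : Bool) :
    Qf fresh l = if fresh then runsR l else runsR (stripRun l) := by
  induction l generalizing fresh with
  | nil => unfold Qf; simp [runsR_nil, stripRun]
  | cons a rest ih =>
    rcases rest with _ | ⟨b, t⟩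
    · unfold Qf
      rcases fresh with _ | _ <;> simp [runsR_nil, runsR_cons, stripRun]
    · rw [Qf_cons, ih]
      by_cases hab : a = b
      · subst hab
        have hkey : ((t.length == 0) || (t.getD 0 ' ' != a))
            = ((t.takeWhile (· == a)).length == 0) := by
          rcases t with _ | ⟨x, s⟩
          · simp
          · by_cases hx : x = a <;> simp [List.takeWhile_cons, hx]
        rcases fresh with _ | _
        · simp [stripRun]
        · conv_rhs => rw [if_pos rfl, runsR_cons]
          simp only [List.takeWhile_cons, List.dropWhile_cons, beq_self_eq_true, if_true,
            List.length_cons, stripRun, bne_self_eq_false, Bool.false_eq_true, if_false,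
            Bool.and_true, Bool.true_and, hkey]
          congr 1
          rw [Bool.eq_iff_iff]
          simp only [beq_iff_eq]
          omega
      · have hab' : (a == b) = false := by simp [hab]
        have hne : (a != b) = true := by simp [hab]
        have hba : (b == a) = false := by simp [Ne.symm hab]
        have hdw : List.dropWhile (· == a) (b :: t) = b :: t := by
          simp [List.dropWhile_cons, hba]
        have hR : runsR (a :: b :: t) = runsR (b :: t) := by
          rw [runsR_cons]
          simp [List.takeWhile_cons, hba, hdw]
        rcases fresh with _ | _ <;>
          simp [hab', hne, stripRun, hdw, hR]

-- ===== VERDICT (by name: the statement is the Claim_ definition above) =====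
theorem has_doubles_spec : Claim_equal_has_doubles := by
  intro numstr _ hpre
  unfold Spec_has_doubles
  rw [alt_eq_Qf, Qf_eq_runsR, if_pos rfl]
  cases h : numstr.toList with
  | nil => exact absurd h hpre
  | cons c rest =>
    rw [show has_doubles numstr = hdLoop rest c 1 from by unfold has_doubles; rw [h]]
    rw [hdLoop_eq_runsR, runsR_cons]
    congr 1
    rw [Bool.eq_iff_iff]
    simp only [beq_iff_eq]
    omega
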